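-- pv_equiv track=rewrite | github.com/KiloMusician/ChatDev2 | ecosystem/SimulatedVerse/ops/rotate_shared_quest_log.py | build_rotation_plan
-- ===== SOURCE A (Python) =====
-- def byte_len(lines: list[str]) -> int:
--     return sum(len(line.encode("utf-8")) for line in lines)
--
-- def build_rotation_plan(lines: list[str], max_bytes: int, keep_lines: int) -> tuple[list[str], list[str]]:
--     if not lines:
--         return [], []
--     kept = lines[-keep_lines:] if keep_lines > 0 else []
--     if not kept:
--         kept = lines[-1:]
--     while len(kept) > 1 and byte_len(kept) > max_bytes:
--         kept = kept[1:]
--     archived = lines[: len(lines) - len(kept)]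
--     return archived, kept
-- ===== SOURCE B (Python) =====
-- def build_rotation_plan(lines: list[str], max_bytes: int, keep_lines: int) -> tuple[list[str], list[str]]:
--     if not lines:
--         return [], []
--     n = len(lines)
--     k = min(keep_lines, n) if keep_lines > 0 else 1
--     # one backward pass with a running byte total: count how many trailing lines fit (at least one)
--     m = 0
--     total = 0
--     for line in reversed(lines[n - k:]):
--         total += len(line.encode("utf-8"))
--         if m >= 1 and total > max_bytes:
--             break
--         m += 1
--     m = max(m, 1)
--     return lines[:n - m], lines[n - m:]
-- ===== Notes on version B (the rewrite author's own statement) =====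
-- stated objective: alternative
-- what changed: Replaces the while-loop that re-sums the byte length of the whole kept slice on every shrink step with a single backward pass over the candidate suffix that accumulates a running byte total to locate the kept/archived split point.
import Mathlib
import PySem

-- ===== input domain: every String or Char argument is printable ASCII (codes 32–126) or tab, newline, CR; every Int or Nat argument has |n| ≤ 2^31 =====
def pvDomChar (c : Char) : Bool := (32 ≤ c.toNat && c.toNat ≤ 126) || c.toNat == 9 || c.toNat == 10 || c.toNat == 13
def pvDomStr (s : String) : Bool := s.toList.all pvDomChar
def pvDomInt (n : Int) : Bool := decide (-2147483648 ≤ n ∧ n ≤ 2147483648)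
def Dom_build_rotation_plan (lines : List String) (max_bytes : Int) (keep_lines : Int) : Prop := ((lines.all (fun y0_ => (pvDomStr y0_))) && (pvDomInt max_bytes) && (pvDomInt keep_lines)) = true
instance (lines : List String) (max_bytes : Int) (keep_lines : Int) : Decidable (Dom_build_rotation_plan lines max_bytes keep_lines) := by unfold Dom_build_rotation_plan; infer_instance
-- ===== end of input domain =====

-- B replaces A's shrink loop (which re-sums the whole kept slice each iteration)
-- by one backward pass with a running byte total; objective: alternative.

-- ===== PORT A =====
-- len(line.encode("utf-8")) is ported as PySem.Str.len: exact on the Dom'ed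
-- domain (every admitted character is a one-byte ASCII code point).
def byte_len (lines : List String) : Int :=
  (lines.map PySem.Str.len).sum

-- the while-loop 'while len(kept) > 1 and byte_len(kept) > max_bytes: kept = kept[1:]'
def shrinkA : List String → Int → List String
  | [], _ => []
  | [x], _ => [x]
  | x :: y :: rest, mb =>
    if byte_len (x :: y :: rest) > mb then shrinkA (y :: rest) mb
    else x :: y :: rest

def build_rotation_plan (lines : List String) (max_bytes : Int) (keep_lines : Int) : List String × List String :=
  if lines = [] then ([], [])
  else
    let kept0 := if keep_lines > 0 then PySem.List.slice lines (some (-keep_lines)) none else []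
    let kept1 := if kept0 = [] then PySem.List.slice lines (some (-1)) none else kept0
    let kept := shrinkA kept1 max_bytes
    let archived := PySem.List.slice lines none (some ((lines.length : Int) - kept.length))
    (archived, kept)

-- ===== PORT B =====
-- the for-loop over reversed(lines[n-k:]) with running total and break
def scanB : List String → Int → Int → Int → Int
  | [], _, _, m => m
  | l :: rest, mb, total, m =>
    let total' := total + PySem.Str.len l
    if m ≥ 1 ∧ total' > mb then m
    else scanB rest mb total' (m + 1)

def build_rotation_plan_alt (lines : List String) (max_bytes : Int) (keep_lines : Int) : List String × List String :=
  if lines = [] then ([], [])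
  else
    let n : Int := (lines.length : Int)
    let k : Int := if keep_lines > 0 then min keep_lines n else 1
    let m0 := scanB (PySem.List.slice lines (some (n - k)) none).reverse max_bytes 0 0
    let m := max m0 1
    (PySem.List.slice lines none (some (n - m)), PySem.List.slice lines (some (n - m)) none)

-- ===== PRECONDITION & SPEC =====
def Spec_build_rotation_plan (lines : List String) (max_bytes : Int) (keep_lines : Int) (out : List String × List String) : Prop := out = build_rotation_plan_alt lines max_bytes keep_lines
instance (lines : List String) (max_bytes : Int) (keep_lines : Int) (out : List String × List String) : Decidable (Spec_build_rotation_plan lines max_bytes keep_lines out) := by unfold Spec_build_rotation_plan; infer_instance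

-- ===== CLAIM (what is proved, stated in full; the proofs are below) =====
def Claim_equal_build_rotation_plan : Prop := ∀ (lines : List String) (max_bytes : Int) (keep_lines : Int), Dom_build_rotation_plan lines max_bytes keep_lines → Spec_build_rotation_plan lines max_bytes keep_lines (build_rotation_plan lines max_bytes keep_lines)

-- ===== LEMMAS AND PROOFS =====

theorem str_len_nonneg (s : String) : 0 ≤ PySem.Str.len s := by
  simp [PySem.Str.len_eq]

theorem byte_len_nonneg (L : List String) : 0 ≤ byte_len L := by
  induction L with
  | nil => simp [byte_len]
  | cons a t ih =>
    have := str_len_nonneg a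
    simp only [byte_len, List.map_cons, List.sum_cons] at *
    omega

theorem byte_len_reverse (L : List String) : byte_len L.reverse = byte_len L := by
  simp [byte_len, List.sum_reverse]

theorem scanB_le (L : List String) (mb t m : Int) : scanB L mb t m ≤ m + L.length := by
  induction L generalizing t m with
  | nil => simp [scanB]
  | cons a rest ih =>
    simp only [scanB, List.length_cons]
    split
    · omega
    · have := ih (t + PySem.Str.len a) (m + 1); push_cast; push_cast at this; omega

theorem scanB_full (L : List String) (mb t m : Int) (h : t + byte_len L ≤ mb) :
    scanB L mb t m = m + L.length := by
  induction L generalizing t m with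
  | nil => simp [scanB]
  | cons a rest ih =>
    have hrest := byte_len_nonneg rest
    simp only [byte_len, List.map_cons, List.sum_cons] at h
    have hb : ¬ (m ≥ 1 ∧ t + PySem.Str.len a > mb) := by
      rintro ⟨_, hgt⟩
      have : byte_len rest = (rest.map PySem.Str.len).sum := rfl
      omega
    simp only [scanB, if_neg hb, List.length_cons]
    have := ih (t + PySem.Str.len a) (m + 1) (by
      have : byte_len rest = (rest.map PySem.Str.len).sum := rfl
      omega)
    push_cast at this ⊢; omega

theorem scanB_append_last (L : List String) (x : String) (mb t m : Int)
    (hlen : 1 ≤ m + L.length) (hover : mb < t + byte_len L + PySem.Str.len x) :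
    scanB (L ++ [x]) mb t m = scanB L mb t m := by
  induction L generalizing t m with
  | nil =>
    simp only [List.length_nil] at hlen
    simp only [byte_len, List.map_nil, List.sum_nil] at hover
    simp only [List.nil_append, scanB]
    rw [if_pos ⟨by omega, by omega⟩]
  | cons a rest ih =>
    simp only [List.cons_append, scanB]
    split
    · rfl
    · apply ih
      · simp only [List.length_cons] at hlen; push_cast at hlen ⊢; omega
      · simp only [byte_len, List.map_cons, List.sum_cons] at hover
        have : byte_len rest = (rest.map PySem.Str.len).sum := rfl
        omega

-- kept nonempty: A's shrink loop = drop all but the last M elements, where M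
-- comes from B's single backward scan.
theorem shrink_eq_scan (kept : List String) (mb : Int) (h : kept ≠ []) :
    (max (scanB kept.reverse mb 0 0) 1).toNat ≤ kept.length ∧
    shrinkA kept mb = kept.drop (kept.length - (max (scanB kept.reverse mb 0 0) 1).toNat) := by
  induction kept with
  | nil => exact absurd rfl h
  | cons x tail ih =>
    cases tail with
    | nil =>
      refine ⟨?_, ?_⟩ <;> simp [scanB, shrinkA]
    | cons y rest =>
      by_cases hb : byte_len (x :: y :: rest) > mb
      · -- A drops x; B's scan over reverse ++ [x] stops before counting x
        have hrev : (x :: y :: rest).reverse = (y :: rest).reverse ++ [x] := by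
          simp
        have happ : scanB ((y :: rest).reverse ++ [x]) mb 0 0 = scanB (y :: rest).reverse mb 0 0 := by
          apply scanB_append_last
          · simp
          · rw [byte_len_reverse]
            simp only [byte_len, List.map_cons, List.sum_cons] at hb ⊢
            omega
        obtain ⟨h2, h3⟩ := ih (by simp)
        rw [hrev, happ]
        refine ⟨?_, ?_⟩
        · simp only [List.length_cons] at h2 ⊢; omega
        · rw [show shrinkA (x :: y :: rest) mb = shrinkA (y :: rest) mb from by
            simp only [shrinkA, if_pos hb]]
          rw [h3]
          simp only [List.length_cons] at h2 ⊢
          rw [show rest.length + 1 + 1 - (max (scanB (y :: rest).reverse mb 0 0) 1).toNat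
              = (rest.length + 1 - (max (scanB (y :: rest).reverse mb 0 0) 1).toNat) + 1 from by
            omega]
          simp [List.drop_succ_cons]
      · -- whole kept fits: scan counts everything
        have hfull : scanB (x :: y :: rest).reverse mb 0 0 = ((x :: y :: rest).length : Int) := by
          rw [scanB_full _ mb 0 0 (by rw [byte_len_reverse]; omega)]
          simp only [List.length_reverse, List.length_cons]
          push_cast
          ring
        refine ⟨?_, ?_⟩
        · rw [hfull]; simp only [List.length_cons]; omega
        · rw [hfull, show shrinkA (x :: y :: rest) mb = x :: y :: rest from by
            simp only [shrinkA, if_neg hb]]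
          rw [show (max (((x :: y :: rest).length : Nat) : Int) 1).toNat = (x :: y :: rest).length from by
            simp only [List.length_cons]; omega]
          simp

-- both ports, once the candidate suffix lines.drop d is identified, produce the
-- same (archived, kept) pair
theorem main_core (lines : List String) (mb : Int) (d : Nat) (hd : d < lines.length) :
    (PySem.List.slice lines none (some ((lines.length : Int) - ((shrinkA (lines.drop d) mb).length : Int))),
      shrinkA (lines.drop d) mb)
    = (PySem.List.slice lines none (some ((lines.length : Int) - max (scanB (lines.drop d).reverse mb 0 0) 1)),
       PySem.List.slice lines (some ((lines.length : Int) - max (scanB (lines.drop d).reverse mb 0 0) 1)) none) := by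
  have hne : lines.drop d ≠ [] := by
    intro hcon
    have := List.drop_eq_nil_iff.mp hcon
    omega
  obtain ⟨h2, h3⟩ := shrink_eq_scan (lines.drop d) mb hne
  have hm1 : 1 ≤ max (scanB (lines.drop d).reverse mb 0 0) 1 := le_max_right _ _
  have hml : max (scanB (lines.drop d).reverse mb 0 0) 1 ≤ ((lines.length : Int)) := by
    have := scanB_le (lines.drop d).reverse mb 0 0
    simp only [List.length_reverse, List.length_drop] at this
    omega
  set m : Int := max (scanB (lines.drop d).reverse mb 0 0) 1 with hm
  have hlen : (lines.drop d).length = lines.length - d := by simp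
  have hkept : shrinkA (lines.drop d) mb = lines.drop (lines.length - m.toNat) := by
    rw [h3, List.drop_drop]
    congr 1
    simp only [List.length_drop] at h2 ⊢
    omega
  have hlenkept : ((List.drop (lines.length - m.toNat) lines).length : Int) = m := by
    simp only [List.length_drop]
    omega
  have htn : ((lines.length : Int) - m).toNat = lines.length - m.toNat := by omega
  rw [hkept, hlenkept, PySem.List.slice_from lines (show (0:Int) ≤ (lines.length : Int) - m by omega), htn]

theorem build_rotation_plan_eq (lines : List String) (mb kl : Int) :
    build_rotation_plan lines mb kl = build_rotation_plan_alt lines mb kl := by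
  by_cases hnil : lines = []
  · simp [build_rotation_plan, build_rotation_plan_alt, hnil]
  · have hn : 1 ≤ lines.length := by
      cases lines with
      | nil => exact absurd rfl hnil
      | cons a t => simp
    by_cases hkl : kl > 0
    · -- both sides select the suffix lines.drop (n - min kl n)
      have hA : PySem.List.slice lines (some (-kl)) none
          = lines.drop ((lines.length : Int) - min kl (lines.length : Int)).toNat := by
        rw [show (-kl) = -((kl.toNat : Nat) : Int) from by omega,
          PySem.List.slice_from_neg_natCast lines kl.toNat (by omega)]
        congr 1
        omega
      have hB : PySem.List.slice lines (some ((lines.length : Int) - min kl (lines.length : Int))) none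
          = lines.drop ((lines.length : Int) - min kl (lines.length : Int)).toNat := by
        rw [PySem.List.slice_from lines (show (0:Int) ≤ (lines.length : Int) - min kl (lines.length : Int) by omega)]
      have hd : ((lines.length : Int) - min kl (lines.length : Int)).toNat < lines.length := by omega
      have hne : lines.drop ((lines.length : Int) - min kl (lines.length : Int)).toNat ≠ [] := by
        intro hcon
        have := List.drop_eq_nil_iff.mp hcon
        omega
      simp only [build_rotation_plan, build_rotation_plan_alt, if_neg hnil, if_pos hkl, hA, hB,
        if_neg hne]
      exact main_core lines mb _ hd
    · -- keep_lines ≤ 0: both sides select the suffix lines.drop (n - 1)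
      have hA : PySem.List.slice lines (some (-1)) none = lines.drop (lines.length - 1) :=
        PySem.List.slice_from_neg_one lines
      have hB : PySem.List.slice lines (some ((lines.length : Int) - 1)) none
          = lines.drop (lines.length - 1) := by
        rw [PySem.List.slice_from lines (show (0:Int) ≤ (lines.length : Int) - 1 by omega)]
        congr 1
        omega
      have hd : lines.length - 1 < lines.length := by omega
      simp only [build_rotation_plan, build_rotation_plan_alt, if_neg hnil, if_neg hkl,
        hA, hB]
      exact main_core lines mb _ hd

-- ===== VERDICT (by name: the statement is the Claim_ definition above) =====
theorem build_rotation_plan_spec : Claim_equal_build_rotation_plan := by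
  intro lines mb kl _
  exact build_rotation_plan_eq lines mb kl
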